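-- pv_equiv track=rewrite | github.com/marksverdhei/studies-portfolio | IfiS2021/IN4030/Exam1/protein_diff.py | make_alignment_segments
-- ===== SOURCE A (Python) =====
-- def make_alignment_segments(align1, align2, charlim=70):
--     assert len(align1) == len(align2)
--     length = len(align1)
--     connection = "".join("|" if i == j and i != "-" else " " for i, j in zip(align1, align2))
--
--     for i in range(0, length, charlim):
--         yield "\n".join((
--             f"From {i} to {min(i+charlim, length)}",
--             align1[i:i+charlim],
--             connection[i:i+charlim],
--             align2[i:i+charlim],
--             ""
--         ))
-- ===== SOURCE B (Python) =====
-- def make_alignment_segments(align1, align2, charlim=70):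
--     assert len(align1) == len(align2)
--     if charlim <= 0:
--         # a non-positive chunk width produces no chunks (charlim == 0 is excluded upstream)
--         return
--     pos = 0
--     rest1, rest2 = align1, align2
--     while rest1:
--         chunk1, rest1 = rest1[:charlim], rest1[charlim:]
--         chunk2, rest2 = rest2[:charlim], rest2[charlim:]
--         marker = "".join("|" if x == y and x != "-" else " " for x, y in zip(chunk1, chunk2))
--         end = pos + len(chunk1)
--         yield f"From {pos} to {end}\n{chunk1}\n{marker}\n{chunk2}\n"
--         pos = end
-- ===== Notes on version B (the rewrite author's own statement) =====
-- stated objective: alternative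
-- what changed: B replaces A's index arithmetic entirely: no range() over chunk starts, no precomputed full-length connection table and no slicing by absolute indices; instead a while loop peels charlim-sized prefixes off the two remaining strings, carries a running offset accumulator, builds each chunk's marker line from just that chunk, and derives the header's upper bound as pos+len(chunk) instead of min(i+charlim, length).
import Mathlib
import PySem

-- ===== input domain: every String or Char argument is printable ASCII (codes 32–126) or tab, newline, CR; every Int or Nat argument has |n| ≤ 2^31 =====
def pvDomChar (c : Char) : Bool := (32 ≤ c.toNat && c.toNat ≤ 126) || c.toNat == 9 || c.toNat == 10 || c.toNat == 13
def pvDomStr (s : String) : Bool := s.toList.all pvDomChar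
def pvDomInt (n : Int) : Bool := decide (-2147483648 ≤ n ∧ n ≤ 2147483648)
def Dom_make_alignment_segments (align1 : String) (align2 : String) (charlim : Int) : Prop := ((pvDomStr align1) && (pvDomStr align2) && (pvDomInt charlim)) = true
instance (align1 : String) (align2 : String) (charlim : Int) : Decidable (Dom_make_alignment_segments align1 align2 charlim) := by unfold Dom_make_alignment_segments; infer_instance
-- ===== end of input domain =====

-- B replaces A's range-of-starts + precomputed connection table with a while loop that
-- peels charlim-sized prefixes off the remaining strings, carrying a running offset.


-- ===== PORT A =====
-- '|' if i == j and i != '-' else ' '  (per character pair)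
def pvConnChar (x y : Char) : Char := if x = y ∧ x ≠ '-' then '|' else ' '

def make_alignment_segments (align1 : String) (align2 : String) (charlim : Int) : List String :=
  let l1 := align1.toList
  let l2 := align2.toList
  let length : Int := l1.length
  let connection : List Char := (l1.zip l2).map (fun p => pvConnChar p.1 p.2)
  (PySem.List.pyRange 0 length charlim).map (fun i =>
    String.mk (("From ".toList ++ PySem.Int.toChars i ++ " to ".toList
        ++ PySem.Int.toChars (min (i + charlim) length))
      ++ '\n' :: PySem.List.slice l1 (some i) (some (i + charlim))
      ++ '\n' :: PySem.List.slice connection (some i) (some (i + charlim))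
      ++ '\n' :: PySem.List.slice l2 (some i) (some (i + charlim))
      ++ ['\n']))

-- ===== PORT B =====
-- the while loop of Source B: peel a c-sized prefix off each remaining string, emit its block,
-- advance the offset by the chunk's length (0 < c guarantees termination, as in Source B).
def pvAltLoop (c : Nat) (hc : 0 < c) (pos : Int) (r1 r2 : List Char) : List String :=
  if h : r1 = [] then []
  else
    let chunk1 := r1.take c
    let chunk2 := r2.take c
    let marker : List Char := (chunk1.zip chunk2).map (fun p => if p.1 = p.2 ∧ p.1 ≠ '-' then '|' else ' ')
    let e : Int := pos + (chunk1.length : Int)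
    String.mk (("From ".toList ++ PySem.Int.toChars pos ++ " to ".toList ++ PySem.Int.toChars e)
        ++ '\n' :: chunk1 ++ '\n' :: marker ++ '\n' :: chunk2 ++ ['\n'])
      :: pvAltLoop c hc e (r1.drop c) (r2.drop c)
termination_by r1.length
decreasing_by
  have : r1.length ≠ 0 := fun h0 => h (List.eq_nil_of_length_eq_zero h0)
  simpa using by omega

def make_alignment_segments_alt (align1 : String) (align2 : String) (charlim : Int) : List String :=
  if h : charlim ≤ 0 then []
  else pvAltLoop charlim.toNat (by omega) 0 align1.toList align2.toList

-- ===== PRECONDITION & SPEC =====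
-- A raises AssertionError when the alignments have different lengths, and ValueError
-- (range() step zero) when charlim = 0; Pre_ excludes exactly those inputs.
def Pre_make_alignment_segments (align1 : String) (align2 : String) (charlim : Int) : Prop :=
  align1.toList.length = align2.toList.length ∧ charlim ≠ 0
instance (align1 : String) (align2 : String) (charlim : Int) : Decidable (Pre_make_alignment_segments align1 align2 charlim) := by unfold Pre_make_alignment_segments; infer_instance

def pvWitness_make_alignment_segments : String × String × Int := ("ab-b", "ab-c", 3)

def Spec_make_alignment_segments (align1 : String) (align2 : String) (charlim : Int) (out : List String) : Prop := out = make_alignment_segments_alt align1 align2 charlim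
instance (align1 : String) (align2 : String) (charlim : Int) (out : List String) : Decidable (Spec_make_alignment_segments align1 align2 charlim out) := by unfold Spec_make_alignment_segments; infer_instance

-- ===== CLAIM (what is proved, stated in full; the proofs are below) =====
def Claim_equal_make_alignment_segments : Prop := ∀ (align1 : String) (align2 : String) (charlim : Int), Dom_make_alignment_segments align1 align2 charlim → Pre_make_alignment_segments align1 align2 charlim → Spec_make_alignment_segments align1 align2 charlim (make_alignment_segments align1 align2 charlim)

-- ===== LEMMAS AND PROOFS =====

-- range(a, b, s) is empty for s < 0 and a ≤ b
theorem pv_pyRange_neg_nil (a b s : Int) (hs : s < 0) (hab : a ≤ b) :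
    PySem.List.pyRange a b s = [] := by
  simp only [PySem.List.pyRange]
  split_ifs with h1 h2 h3 <;> simp_all <;> omega

-- range(a, b, s) is empty for 0 < s and b ≤ a
theorem pv_pyRange_pos_nil (a b s : Int) (hs : 0 < s) (hab : b ≤ a) :
    PySem.List.pyRange a b s = [] := by
  rw [PySem.List.pyRange_of_pos a b hs]
  rw [if_neg (by omega)]
  simp

-- range(a, b, s) peels its first element for 0 < s and a < b
theorem pv_pyRange_pos_cons (a b s : Int) (hs : 0 < s) (hab : a < b) :
    PySem.List.pyRange a b s = a :: PySem.List.pyRange (a + s) b s := by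
  rw [PySem.List.pyRange_of_pos a b hs, PySem.List.pyRange_of_pos (a + s) b hs]
  rw [if_pos hab]
  have hkey : (b - a + s - 1) / s = (if a + s < b then (b - (a + s) + s - 1) / s else 0) + 1 := by
    by_cases h2 : a + s < b
    · rw [if_pos h2]
      have h3 : b - a + s - 1 = (b - (a + s) + s - 1) + 1 * s := by ring
      rw [h3, Int.add_mul_ediv_right _ _ (by omega)]
    · rw [if_neg h2]
      have h3 : b - a + s - 1 = (b - a - 1) + 1 * s := by ring
      rw [h3, Int.add_mul_ediv_right _ _ (by omega)]
      have h4 : (b - a - 1) / s = 0 := Int.ediv_eq_zero_of_lt (by omega) (by omega)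
      omega
  rw [hkey]
  have htn : ((if a + s < b then (b - (a + s) + s - 1) / s else 0) + 1).toNat
      = (if a + s < b then (b - (a + s) + s - 1) / s else 0).toNat + 1 := by
    have h5 : 0 ≤ (if a + s < b then (b - (a + s) + s - 1) / s else 0) := by
      split_ifs with h2
      · exact Int.ediv_nonneg (by omega) (by omega)
      · exact le_refl 0
    omega
  rw [htn, List.range_succ_eq_map, List.map_cons, List.map_map]
  have hN : (if a + s < b then (b - (a + s) + s - 1) / s else 0).toNat
      = if a + s < b then ((b - (a + s) + s - 1) / s).toNat else 0 := by
    split_ifs <;> simp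
  rw [hN]
  congr 1
  · simp
  · apply List.map_congr_left
    intro t _
    simp only [Function.comp_apply, Nat.succ_eq_add_one]
    push_cast
    ring

-- Slicing A's precomputed connection table equals mapping the rule over the zip of the
-- two slices, provided the two lists have equal length.
theorem pv_slice_conn (l1 l2 : List Char) (h : l1.length = l2.length) (a b : Int) :
    PySem.List.slice ((l1.zip l2).map (fun p => pvConnChar p.1 p.2)) (some a) (some b)
      = ((PySem.List.slice l1 (some a) (some b)).zip
          (PySem.List.slice l2 (some a) (some b))).map
            (fun p => if p.1 = p.2 ∧ p.1 ≠ '-' then '|' else ' ') := by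
  have hz : (l1.zip l2).length = l1.length := by
    simp [List.length_zip, h]
  simp only [PySem.List.slice, List.length_map, hz, h, pvConnChar]
  rw [← List.map_drop, ← List.map_take]
  congr 1
  simp only [List.zip, List.drop_zipWith, List.take_zipWith]

-- xs[k : k+c] is the c-sized chunk at offset k (k a Nat, 0 < c)
theorem pv_slice_chunk (l : List Char) (k : Nat) (c : Int) (hc : 0 < c) :
    PySem.List.slice l (some (k : Int)) (some ((k : Int) + c)) = (l.drop k).take c.toNat := by
  rw [PySem.List.slice_toNat l (by positivity) (by omega)]
  congr 1 <;> omega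

-- one-step unfoldings of B's loop
theorem pvAltLoop_nil (c : Nat) (hc : 0 < c) (pos : Int) (r2 : List Char) :
    pvAltLoop c hc pos [] r2 = [] := by
  rw [pvAltLoop]
  simp

theorem pvAltLoop_cons (c : Nat) (hc : 0 < c) (pos : Int) (r1 r2 : List Char) (h : r1 ≠ []) :
    pvAltLoop c hc pos r1 r2 =
      String.mk (("From ".toList ++ PySem.Int.toChars pos ++ " to ".toList
          ++ PySem.Int.toChars (pos + ((r1.take c).length : Int)))
        ++ '\n' :: r1.take c
        ++ '\n' :: ((r1.take c).zip (r2.take c)).map (fun p => if p.1 = p.2 ∧ p.1 ≠ '-' then '|' else ' ')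
        ++ '\n' :: r2.take c ++ ['\n'])
      :: pvAltLoop c hc (pos + ((r1.take c).length : Int)) (r1.drop c) (r2.drop c) := by
  rw [pvAltLoop, dif_neg h]

-- The chunked loop of B computes, suffix by suffix, exactly A's map over the chunk starts.
theorem pv_main (l1 l2 : List Char) (c : Int) (hc : 0 < c)
    (hlen : l1.length = l2.length) (k : Nat) :
    (PySem.List.pyRange (k : Int) (l1.length : Int) c).map (fun i =>
      String.mk (("From ".toList ++ PySem.Int.toChars i ++ " to ".toList
          ++ PySem.Int.toChars (min (i + c) (l1.length : Int)))
        ++ '\n' :: PySem.List.slice l1 (some i) (some (i + c))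
        ++ '\n' :: PySem.List.slice ((l1.zip l2).map (fun p => pvConnChar p.1 p.2)) (some i) (some (i + c))
        ++ '\n' :: PySem.List.slice l2 (some i) (some (i + c))
        ++ ['\n']))
      = pvAltLoop c.toNat (by omega) (k : Int) (l1.drop k) (l2.drop k) := by
  by_cases hk : l1.length ≤ k
  · rw [pv_pyRange_pos_nil _ _ _ hc (by exact_mod_cast hk)]
    rw [List.drop_eq_nil_of_le hk, pvAltLoop_nil]
    exact List.map_nil
  · push_neg at hk
    have hne1 : l1.drop k ≠ [] := by
      intro h0
      have := congrArg List.length h0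
      simp at this
      omega
    rw [pv_pyRange_pos_cons _ _ _ hc (by exact_mod_cast hk), List.map_cons,
        pvAltLoop_cons _ _ _ _ _ hne1]
    have hchunklen : (((l1.drop k).take c.toNat).length : Int) = min ((k : Int) + c) (l1.length : Int) - k := by
      simp [List.length_take, List.length_drop]
      omega
    congr 1
    · rw [pv_slice_conn l1 l2 hlen, pv_slice_chunk l1 k c hc, pv_slice_chunk l2 k c hc,
          hchunklen]
      have heq : (k : Int) + (min ((k : Int) + c) (l1.length : Int) - k) = min ((k : Int) + c) (l1.length : Int) := by omega
      rw [heq]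
    · rw [hchunklen]
      by_cases h2 : l1.length ≤ k + c.toNat
      · rw [pv_pyRange_pos_nil _ _ _ hc (by push_cast; omega)]
        have hdnil : (l1.drop k).drop c.toNat = [] := by
          rw [List.drop_drop]
          exact List.drop_eq_nil_of_le (by omega)
        rw [hdnil, pvAltLoop_nil]
        exact List.map_nil
      · push_neg at h2
        have hIH := pv_main l1 l2 c hc hlen (k + c.toNat)
        have hcast : ((k + c.toNat : Nat) : Int) = (k : Int) + c := by push_cast; omega
        rw [hcast] at hIH
        have hmin : (k : Int) + (min ((k : Int) + c) (l1.length : Int) - k) = (k : Int) + c := by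
          push_cast at h2 ⊢
          omega
        rw [hmin, List.drop_drop, List.drop_drop]
        simpa [Nat.add_comm] using hIH
termination_by l1.length - k
decreasing_by omega

-- ===== VERDICT (by name: the statement is the Claim_ definition above) =====
theorem make_alignment_segments_spec : Claim_equal_make_alignment_segments := by
  intro align1 align2 charlim _ hpre
  obtain ⟨hlen, hne⟩ := hpre
  unfold Spec_make_alignment_segments
  simp only [make_alignment_segments, make_alignment_segments_alt]
  by_cases hneg : charlim ≤ 0
  · rw [dif_pos hneg, pv_pyRange_neg_nil 0 _ charlim (by omega) (by positivity)]
    simp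
  · rw [dif_neg hneg]
    have hmain := pv_main align1.toList align2.toList charlim (by omega) hlen 0
    simp only [Nat.cast_zero, List.drop_zero] at hmain
    exact hmain
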